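-- pv_equiv track=rewrite | github.com/fahamnaz/dabang_coders | ml_models/data/feature_engineering.py | _count_streak_breaks
-- ===== SOURCE A (Python) =====
-- def _count_streak_breaks(events: list[dict]) -> int:
--     """Count how many times a correct run was broken by an error."""
--     breaks, in_streak = 0, False
--     for e in events:
--         if e.get("correct", False):
--             in_streak = True
--         elif in_streak:
--             breaks += 1
--             in_streak = False
--     return breaks
-- ===== SOURCE B (Python) =====
-- def _count_streak_breaks(events: list[dict]) -> int:
--     """Count how many times a correct run was broken by an error."""
--     flags = [bool(e.get("correct", False)) for e in events]
--     return sum(1 for a, b in zip(flags, flags[1:]) if a and not b)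
-- ===== Notes on version B (the rewrite author's own statement) =====
-- stated objective: idiomatic
-- what changed: Replaces the explicit state-machine loop (breaks counter plus in_streak flag) by extracting the boolean flag list once and counting True-to-False transitions over zipped adjacent pairs.
import Mathlib
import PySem

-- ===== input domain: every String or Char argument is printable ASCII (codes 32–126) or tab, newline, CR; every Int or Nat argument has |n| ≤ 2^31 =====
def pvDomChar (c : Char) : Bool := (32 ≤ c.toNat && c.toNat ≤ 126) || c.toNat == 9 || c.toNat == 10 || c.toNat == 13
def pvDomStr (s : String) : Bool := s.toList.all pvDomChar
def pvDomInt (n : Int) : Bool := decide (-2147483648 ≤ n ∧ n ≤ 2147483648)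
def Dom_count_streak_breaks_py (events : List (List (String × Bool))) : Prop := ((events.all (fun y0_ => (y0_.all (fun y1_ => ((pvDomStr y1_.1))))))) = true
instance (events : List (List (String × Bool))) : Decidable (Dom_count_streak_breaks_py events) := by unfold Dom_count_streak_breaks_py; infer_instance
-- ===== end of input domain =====

-- B replaces A's state-machine loop by counting True→False transitions over zipped adjacent flag pairs (idiomatic; same cost).
-- ===== PORT A =====
def count_streak_breaks_py (events : List (List (String × Bool))) : Int :=
  (events.foldl
    (fun (st : Int × Bool) e =>
      if (PySem.Dict.mk e).getD "correct" false then (st.1, true)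
      else if st.2 then (st.1 + 1, false)
      else st)
    (0, false)).1

-- ===== PORT B =====
def count_streak_breaks_py_alt (events : List (List (String × Bool))) : Int :=
  let flags := events.map (fun e => (PySem.Dict.mk e).getD "correct" false)
  (((flags.zip flags.tail).filter (fun p => p.1 && !p.2)).length : Int)

-- ===== PRECONDITION & SPEC =====
def Spec_count_streak_breaks_py (events : List (List (String × Bool))) (out : Int) : Prop := out = count_streak_breaks_py_alt events
instance (events : List (List (String × Bool))) (out : Int) : Decidable (Spec_count_streak_breaks_py events out) := by unfold Spec_count_streak_breaks_py; infer_instance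

-- ===== CLAIM (what is proved, stated in full; the proofs are below) =====
def Claim_equal_count_streak_breaks_py : Prop := ∀ (events : List (List (String × Bool))), Dom_count_streak_breaks_py events → Spec_count_streak_breaks_py events (count_streak_breaks_py events)

-- ===== LEMMAS AND PROOFS =====

lemma csb_fold_map (events : List (List (String × Bool))) : ∀ (st : Int × Bool),
    events.foldl
      (fun (st : Int × Bool) e =>
        if (PySem.Dict.mk e).getD "correct" false then (st.1, true)
        else if st.2 then (st.1 + 1, false) else st) st
    = (events.map (fun e => (PySem.Dict.mk e).getD "correct" false)).foldl
      (fun (st : Int × Bool) f =>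
        if f then (st.1, true) else if st.2 then (st.1 + 1, false) else st) st := by
  induction events with
  | nil => intro st; rfl
  | cons e t ih => intro st; simp only [List.foldl_cons, List.map_cons, ih]

lemma csb_key (l : List Bool) : ∀ (b : Int) (s : Bool),
    (l.foldl
      (fun (st : Int × Bool) f =>
        if f then (st.1, true) else if st.2 then (st.1 + 1, false) else st)
      (b, s)).1
    = b + ((((s :: l).zip l).filter (fun p => p.1 && !p.2)).length : Int) := by
  induction l with
  | nil => intro b s; simp
  | cons f t ih =>
    intro b s
    cases f <;> cases s <;>
      simp [List.foldl_cons, ih, List.zip_cons_cons] <;> ring_nf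

-- ===== VERDICT (by name: the statement is the Claim_ definition above) =====
theorem count_streak_breaks_py_spec : Claim_equal_count_streak_breaks_py := by
  intro events _
  unfold Spec_count_streak_breaks_py count_streak_breaks_py count_streak_breaks_py_alt
  rw [csb_fold_map, csb_key]
  cases h : events.map (fun e => (PySem.Dict.mk e).getD "correct" false) with
  | nil => simp
  | cons f t => simp [List.zip_cons_cons]
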